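-- pv_equiv track=rewrite | github.com/briank-hse/MPage | Development/CernerScraper/CernerScraper.py | build_source_record_maps
-- ===== SOURCE A (Python) =====
-- def build_source_record_maps(documents: list[dict], chunks: list[dict]) -> tuple[dict[str, dict], dict[str, list[dict]]]:
--     docs_by_source: dict[str, dict] = {}
--     chunks_by_source: dict[str, list[dict]] = {}
--
--     for document in documents:
--         source_path = document.get("source_path") or document.get("source_file")
--         if source_path:
--             docs_by_source[str(source_path)] = document
--
--     for chunk in chunks:
--         source_path = chunk.get("source_path") or chunk.get("source_file")
--         if not source_path:
--             continue
--         key = str(source_path)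
--         chunks_by_source.setdefault(key, []).append(chunk)
--
--     for source_path, records in chunks_by_source.items():
--         records.sort(key=lambda record: int(record.get("chunk_index", 0)))
--
--     return docs_by_source, chunks_by_source
-- ===== SOURCE B (Python) =====
-- def build_source_record_maps(documents: list[dict], chunks: list[dict]) -> tuple[dict[str, dict], dict[str, list[dict]]]:
--     docs_by_source: dict[str, dict] = {}
--     for document in documents:
--         source_path = document.get("source_path") or document.get("source_file")
--         if source_path:
--             docs_by_source[str(source_path)] = document
--
--     # one filtering pass, then a single global stable sort, then group in original key order
--     pairs = []
--     for chunk in chunks: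
--         source_path = chunk.get("source_path") or chunk.get("source_file")
--         if source_path:
--             pairs.append((str(source_path), chunk))
--
--     chunks_by_source: dict[str, list[dict]] = {key: [] for key, _ in pairs}
--     for key, chunk in sorted(pairs, key=lambda pair: int(pair[1].get("chunk_index", 0))):
--         chunks_by_source[key].append(chunk)
--
--     return docs_by_source, chunks_by_source
-- ===== Notes on version B (the rewrite author's own statement) =====
-- stated objective: alternative
-- what changed: A groups chunks into per-source lists and then sorts each group separately; B flattens to one (key, chunk) pair list, does a single global stable sort by chunk_index, and groups the sorted pairs into pre-created empty buckets, which yields the same per-group order by sort stability.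
import Mathlib
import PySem

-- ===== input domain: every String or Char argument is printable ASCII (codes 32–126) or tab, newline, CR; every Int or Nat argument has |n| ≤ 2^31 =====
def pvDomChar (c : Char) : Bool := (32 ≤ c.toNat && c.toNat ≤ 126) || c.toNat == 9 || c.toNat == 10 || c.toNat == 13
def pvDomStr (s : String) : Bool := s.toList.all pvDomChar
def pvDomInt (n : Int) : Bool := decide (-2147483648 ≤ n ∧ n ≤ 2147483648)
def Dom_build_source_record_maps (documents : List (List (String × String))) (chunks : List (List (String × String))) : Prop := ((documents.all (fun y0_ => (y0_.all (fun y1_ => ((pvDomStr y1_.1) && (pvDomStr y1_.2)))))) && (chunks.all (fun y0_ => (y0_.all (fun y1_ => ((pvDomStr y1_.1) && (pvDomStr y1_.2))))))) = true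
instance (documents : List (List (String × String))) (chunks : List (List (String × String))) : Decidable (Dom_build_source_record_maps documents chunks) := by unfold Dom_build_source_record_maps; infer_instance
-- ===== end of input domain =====

-- B groups chunks by one global stable sort over a flat (key, chunk) list instead of per-group sorts; objective: alternative decomposition, same observable result.


-- ===== PORT A =====
-- shared helpers: both Pythons compute the source key and the sort key by the same expressions
-- record.get(k): first-match lookup on the association list
def pvGet (d : List (String × String)) (k : String) : Option String :=
  (PySem.Dict.mk d).get? k
-- Python 'a or b' on two Optional[str] values ('' and None are falsy)
def pvOrStr (a b : Option String) : Option String :=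
  match a with
  | some s => if s = "" then b else some s
  | none => b
-- source_path = r.get("source_path") or r.get("source_file"); kept only if truthy (str(...) is the identity on str)
def pvSrc (r : List (String × String)) : Option String :=
  match pvOrStr (pvGet r "source_path") (pvGet r "source_file") with
  | some s => if s = "" then none else some s
  | none => none
-- int(record.get("chunk_index", 0)); total here — inputs where int() raises ValueError are excluded by Pre_
def pvIdx (r : List (String × String)) : Int :=
  match pvGet r "chunk_index" with
  | none => 0
  | some s => (PySem.Int.ofStr? s).getD 0

def build_source_record_maps (documents : List (List (String × String))) (chunks : List (List (String × String))) : (List (String × List (String × String))) × (List (String × List (List (String × String)))) :=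
  let docs_by_source : PySem.Dict String (List (String × String)) :=
    documents.foldl (fun d doc =>
      match pvSrc doc with
      | some k => d.insert k doc
      | none => d) PySem.Dict.empty
  -- chunks_by_source.setdefault(key, []).append(chunk)  ≡  d[key] = d.get(key, []) + [chunk]
  let chunks_by_source : PySem.Dict String (List (List (String × String))) :=
    chunks.foldl (fun d c =>
      match pvSrc c with
      | some k => d.modify k [] (fun v => v ++ [c])
      | none => d) PySem.Dict.empty
  -- final loop: records.sort(key=lambda record: int(record.get("chunk_index", 0))), in place per item
  (docs_by_source.items,
   chunks_by_source.items.map (fun p => (p.1, PySem.List.sorted p.2 (fun r => pvIdx r) false)))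

-- ===== PORT B =====
def build_source_record_maps_alt (documents : List (List (String × String))) (chunks : List (List (String × String))) : (List (String × List (String × String))) × (List (String × List (List (String × String)))) :=
  let docs_by_source : PySem.Dict String (List (String × String)) :=
    documents.foldl (fun d doc =>
      match pvSrc doc with
      | some k => d.insert k doc
      | none => d) PySem.Dict.empty
  -- pairs.append((str(source_path), chunk)) for chunks with a truthy source
  let pairs : List (String × List (String × String)) :=
    chunks.filterMap (fun c => (pvSrc c).map (fun k => (k, c)))
  -- chunks_by_source = {key: [] for key, _ in pairs}
  let base : PySem.Dict String (List (List (String × String))) :=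
    pairs.foldl (fun d p => d.insert p.1 ([] : List (List (String × String)))) PySem.Dict.empty
  -- for key, chunk in sorted(pairs, key=...): chunks_by_source[key].append(chunk)   (key always present)
  let chunks_by_source : PySem.Dict String (List (List (String × String))) :=
    (PySem.List.sorted pairs (fun p => pvIdx p.2) false).foldl
      (fun d p => d.modify p.1 [] (fun v => v ++ [p.2])) base
  (docs_by_source.items, chunks_by_source.items)

-- ===== PRECONDITION & SPEC =====
-- Pre_ excludes exactly the chunks inputs on which Python's int(chunk.get("chunk_index", 0)) raises
-- ValueError (a non-int-parseable chunk_index string on a chunk with a truthy source path); both A and B raise there.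
def Pre_build_source_record_maps (documents : List (List (String × String))) (chunks : List (List (String × String))) : Prop :=
  (chunks.all (fun c =>
    match pvSrc c with
    | none => true
    | some _ =>
      match pvGet c "chunk_index" with
      | none => true
      | some s => (PySem.Int.ofStr? s).isSome)) = true
instance (documents : List (List (String × String))) (chunks : List (List (String × String))) : Decidable (Pre_build_source_record_maps documents chunks) := by unfold Pre_build_source_record_maps; infer_instance

def pvWitness_build_source_record_maps : (List (List (String × String))) × (List (List (String × String))) :=
  ([[("source_path", "a.txt"), ("title", "A")]],
   [[("source_path", "a.txt"), ("chunk_index", "1")],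
    [("source_path", "a.txt"), ("chunk_index", "0")],
    [("source_file", "b.txt"), ("chunk_index", "2")]])

def Spec_build_source_record_maps (documents : List (List (String × String))) (chunks : List (List (String × String))) (out : (List (String × List (String × String))) × (List (String × List (List (String × String))))) : Prop := out = build_source_record_maps_alt documents chunks
instance (documents : List (List (String × String))) (chunks : List (List (String × String))) (out : (List (String × List (String × String))) × (List (String × List (List (String × String))))) : Decidable (Spec_build_source_record_maps documents chunks out) := by unfold Spec_build_source_record_maps; infer_instance

-- ===== CLAIM (what is proved, stated in full; the proofs are below) =====
def Claim_equal_build_source_record_maps : Prop := ∀ (documents : List (List (String × String))) (chunks : List (List (String × String))), Dom_build_source_record_maps documents chunks → Pre_build_source_record_maps documents chunks → Spec_build_source_record_maps documents chunks (build_source_record_maps documents chunks)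

-- ===== LEMMAS AND PROOFS =====

-- a loop that skips elements without a key is the loop over the (key, element) pairs it keeps
theorem pv_foldl_match_filterMap :
    ∀ (l : List (List (String × String))) (d : PySem.Dict String (List (List (String × String)))),
      l.foldl (fun d c => match pvSrc c with | some k => d.modify k [] (fun v => v ++ [c]) | none => d) d
        = (l.filterMap (fun c => (pvSrc c).map (fun k => (k, c)))).foldl
            (fun d p => d.modify p.1 [] (fun v => v ++ [p.2])) d := by
  intro l
  induction l with
  | nil => intro d; rfl
  | cons c t ih =>
    intro d
    cases h : pvSrc c with
    | none => simp [List.foldl_cons, h, ih]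
    | some k => simp [List.foldl_cons, h, ih]

-- insertBy preserves key-sortedness
theorem pv_pairwise_insertBy {α : Type} (key : α → Int) (x : α) :
    ∀ (acc : List α), acc.Pairwise (fun a b => key a ≤ key b) →
      (PySem.List.insertBy (fun a b => decide (key a < key b)) x acc).Pairwise (fun a b => key a ≤ key b) := by
  intro acc
  induction acc with
  | nil => intro _; simp [PySem.List.insertBy]
  | cons y ys ih =>
    intro h
    rw [List.pairwise_cons] at h
    by_cases hb : key x < key y
    · simp only [PySem.List.insertBy, hb, decide_true, if_pos]
      refine List.Pairwise.cons ?_ (List.Pairwise.cons h.1 h.2)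
      intro z hz
      rcases List.mem_cons.mp hz with rfl | hz
      · exact le_of_lt hb
      · exact le_trans (le_of_lt hb) (h.1 z hz)
    · simp only [PySem.List.insertBy, hb, decide_false, if_neg, Bool.false_eq_true, not_false_iff]
      refine List.Pairwise.cons ?_ (ih h.2)
      intro z hz
      rcases (PySem.List.mem_insertBy _ x z ys).mp hz with rfl | hz
      · exact le_of_not_gt hb
      · exact h.1 z hz

-- filtering commutes with inserting into a sorted accumulator
theorem pv_filter_insertBy {α : Type} (key : α → Int) (p : α → Bool) (x : α) :
    ∀ (acc : List α), acc.Pairwise (fun a b => key a ≤ key b) →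
      (PySem.List.insertBy (fun a b => decide (key a < key b)) x acc).filter p
        = if p x then PySem.List.insertBy (fun a b => decide (key a < key b)) x (acc.filter p)
          else acc.filter p := by
  intro acc
  induction acc with
  | nil => intro _; cases hp : p x <;> simp [PySem.List.insertBy, hp]
  | cons y ys ih =>
    intro h
    rw [List.pairwise_cons] at h
    by_cases hb : key x < key y
    · -- x goes in front; every kept element of y :: ys also has key x < key
      simp only [PySem.List.insertBy, hb, decide_true, if_pos]
      cases hp : p x with
      | false => simp [List.filter, hp]
      | true =>
        cases hy : p y with
        | true => simp [List.filter, hp, hy, PySem.List.insertBy, hb]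
        | false =>
          simp only [List.filter, hp, hy]
          -- x is still before every kept element of ys (all have key ≥ key y > key x)
          cases hf : ys.filter p with
          | nil => simp [PySem.List.insertBy]
          | cons z zs =>
            have hz : z ∈ ys := List.mem_of_mem_filter (hf ▸ List.mem_cons_self)
            have : key x < key z := lt_of_lt_of_le hb (h.1 z hz)
            simp [PySem.List.insertBy, this]
    · simp only [PySem.List.insertBy, hb, decide_false, if_neg, Bool.false_eq_true, not_false_iff]
      cases hp : p x with
      | false =>
        cases hy : p y <;> simp_all [List.filter, ih h.2]
      | true =>
        cases hy : p y with
        | true => simp [List.filter, hp, hy, ih h.2, PySem.List.insertBy, hb]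
        | false => simp [List.filter, hp, hy, ih h.2]

-- stable sort commutes with filter
theorem pv_filter_sorted {α : Type} (key : α → Int) (p : α → Bool) (l : List α) :
    (PySem.List.sorted l key false).filter p = PySem.List.sorted (l.filter p) key false := by
  rw [PySem.List.sorted_eq_foldl_insertBy, PySem.List.sorted_eq_foldl_insertBy]
  suffices h : ∀ (acc : List α), acc.Pairwise (fun a b => key a ≤ key b) →
      (l.foldl (fun acc x => PySem.List.insertBy (fun a b => decide (key a < key b)) x acc) acc).filter p
        = (l.filter p).foldl (fun acc x => PySem.List.insertBy (fun a b => decide (key a < key b)) x acc) (acc.filter p) by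
    simpa using h [] (by simp)
  induction l with
  | nil => intro acc _; rfl
  | cons x t ih =>
    intro acc hs
    have hs' := pv_pairwise_insertBy key x acc hs
    cases hp : p x with
    | true =>
      simp only [List.foldl_cons, List.filter, hp]
      rw [ih _ hs', pv_filter_insertBy key p x acc hs, hp, if_pos rfl]
    | false =>
      simp only [List.foldl_cons, List.filter, hp]
      rw [ih _ hs', pv_filter_insertBy key p x acc hs, hp, if_neg (by simp)]

-- mapping a projection commutes with insertBy when the sort key factors through it
theorem pv_map_insertBy {α β : Type} (f : α → β) (key : β → Int) (x : α) :
    ∀ (acc : List α),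
      (PySem.List.insertBy (fun a b => decide (key (f a) < key (f b))) x acc).map f
        = PySem.List.insertBy (fun a b => decide (key a < key b)) (f x) (acc.map f) := by
  intro acc
  induction acc with
  | nil => simp [PySem.List.insertBy]
  | cons y ys ih =>
    by_cases hb : key (f x) < key (f y)
    · simp [PySem.List.insertBy, hb]
    · simp [PySem.List.insertBy, hb, ih]

-- stable sort commutes with mapping out the sorted component
theorem pv_map_sorted {α β : Type} (f : α → β) (key : β → Int) (l : List α) :
    (PySem.List.sorted l (fun a => key (f a)) false).map f = PySem.List.sorted (l.map f) key false := by
  rw [PySem.List.sorted_eq_foldl_insertBy, PySem.List.sorted_eq_foldl_insertBy]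
  suffices h : ∀ (acc : List α),
      (l.foldl (fun acc x => PySem.List.insertBy (fun a b => decide (key (f a) < key (f b))) x acc) acc).map f
        = (l.map f).foldl (fun acc x => PySem.List.insertBy (fun a b => decide (key a < key b)) x acc) (acc.map f) by
    simpa using h []
  induction l with
  | nil => intro acc; rfl
  | cons x t ih =>
    intro acc
    simp only [List.foldl_cons, List.map_cons]
    rw [ih, pv_map_insertBy f key x acc]

-- B's base dict {k: [] for ...} maps every key to []
theorem pv_getD_base (pairs : List (String × List (String × String))) (k : String) :
    ∀ (d : PySem.Dict String (List (List (String × String)))),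
      (∀ k', d.getD k' ([] : List (List (String × String))) = []) →
      (pairs.foldl (fun d p => d.insert p.1 ([] : List (List (String × String)))) d).getD k [] = [] := by
  induction pairs with
  | nil => intro d hd; exact hd k
  | cons p t ih =>
    intro d hd
    refine ih _ (fun k' => ?_)
    rw [PySem.Dict.getD_insert]
    split <;> simp [hd]

-- ===== VERDICT (by name: the statement is the Claim_ definition above) =====
theorem build_source_record_maps_spec : Claim_equal_build_source_record_maps := by
  intro documents chunks _hdom _hpre
  unfold Spec_build_source_record_maps build_source_record_maps build_source_record_maps_alt
  refine Prod.ext rfl ?_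
  simp only []
  -- name the flat pair list
  set pairs : List (String × List (String × String)) :=
    chunks.filterMap (fun c => (pvSrc c).map (fun k => (k, c))) with hpairs
  -- A's grouping loop is the loop over pairs
  rw [pv_foldl_match_filterMap chunks PySem.Dict.empty]
  set spairs := PySem.List.sorted pairs (fun p => pvIdx p.2) false with hsp
  set d1 : PySem.Dict String (List (List (String × String))) :=
    pairs.foldl (fun d p => d.modify p.1 [] (fun v => v ++ [p.2])) PySem.Dict.empty with hd1
  set base : PySem.Dict String (List (List (String × String))) :=
    pairs.foldl (fun d p => d.insert p.1 ([] : List (List (String × String)))) PySem.Dict.empty with hbase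
  set d2 : PySem.Dict String (List (List (String × String))) :=
    spairs.foldl (fun d p => d.modify p.1 [] (fun v => v ++ [p.2])) base with hd2
  -- keys
  have hk1 : d1.keys = PySem.Set.ofList (pairs.map (·.1)) := by
    rw [hd1, PySem.Dict.keys_foldl_modify_key pairs (·.1) ([] : List (List (String × String)))
          (fun _ p => (fun v => v ++ [p.2]))]
    simp [PySem.Set.update_nil_left, PySem.Dict.keys_empty]
  have hkb : base.keys = PySem.Set.ofList (pairs.map (·.1)) := by
    rw [hbase, PySem.Dict.keys_foldl_insert_key pairs (·.1)
          (fun _ _ => ([] : List (List (String × String))))]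
    simp [PySem.Set.update_nil_left, PySem.Dict.keys_empty]
  have hk2 : d2.keys = PySem.Set.ofList (pairs.map (·.1)) := by
    rw [hd2, PySem.Dict.keys_foldl_modify_key spairs (·.1) ([] : List (List (String × String)))
          (fun _ p => (fun v => v ++ [p.2])), hkb]
    rw [PySem.Set.update_eq_append_filter]
    have hnil : (PySem.Set.ofList (spairs.map (·.1))).filter
        (fun y => !(PySem.Set.ofList (pairs.map (·.1))).contains y) = [] := by
      rw [List.filter_eq_nil_iff]
      intro y hy
      have h1 : y ∈ spairs.map (·.1) := (PySem.Set.mem_ofList _ y).mp hy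
      have h2 : y ∈ pairs.map (·.1) := by
        rcases List.mem_map.mp h1 with ⟨q, hq, rfl⟩
        exact List.mem_map.mpr ⟨q, (PySem.List.sorted_perm pairs (fun p => pvIdx p.2) false).mem_iff.mp hq, rfl⟩
      simp only [Bool.not_eq_true', PySem.Set.contains_eq_listContains, List.contains_eq_mem,
        decide_eq_false_iff_not, Decidable.not_not] at *
      rcases List.mem_map.mp h2 with ⟨q, hq, rfl⟩
      exact (PySem.Set.mem_ofList _ _).mpr (List.mem_map.mpr ⟨q, hq, rfl⟩)
    rw [hnil, List.append_nil]
  -- nodup keys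
  have hnd1 : d1.keys.Nodup := by
    rw [hd1]
    exact PySem.Dict.nodup_keys_foldl_modify_key pairs (·.1) _ _ _ (by simp [PySem.Dict.keys_empty])
  have hndb : base.keys.Nodup := by
    rw [hbase]
    exact PySem.Dict.nodup_keys_foldl_insert_key pairs (·.1) _ _ (by simp [PySem.Dict.keys_empty])
  have hnd2 : d2.keys.Nodup := by
    rw [hd2]
    exact PySem.Dict.nodup_keys_foldl_modify_key spairs (·.1) _ _ _ hndb
  -- items via keys + getD
  rw [PySem.Dict.items_eq_map_keys d1 hnd1 ([] : List (List (String × String))),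
      PySem.Dict.items_eq_map_keys d2 hnd2 ([] : List (List (String × String))),
      hk1, hk2, List.map_map]
  refine List.map_congr_left (fun k _ => ?_)
  simp only [Function.comp]
  congr 1
  -- per-key values
  have hv1 : d1.getD k [] = ((pairs.filter (fun p => p.1 == k)).map (·.2)) := by
    rw [hd1, PySem.Dict.getD_foldl_modify_append, PySem.Dict.getD_empty]
    simp
  have hv2 : d2.getD k [] = ((spairs.filter (fun p => p.1 == k)).map (·.2)) := by
    rw [hd2, PySem.Dict.getD_foldl_modify_append, pv_getD_base pairs k PySem.Dict.empty
          (fun k' => PySem.Dict.getD_empty k' []), List.nil_append]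
  rw [hv1, hv2, hsp, pv_filter_sorted (fun p => pvIdx p.2) (fun p => p.1 == k) pairs,
      pv_map_sorted (·.2) pvIdx (pairs.filter (fun p => p.1 == k))]
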